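-- pv_equiv track=rewrite | github.com/OCIoficial/2022-11-Final | cuatro/attic/rand.py | find_streaks
-- ===== SOURCE A (Python) =====
-- def find_streaks(grid, N, player):
--     # yapf: disable
--     pos_dirs = ([((i, 0), (0, 1), 'c') for i in range(N)] +
--                 [((0, j), (1, 0), 'r') for j in range(N)] +
--                 [((i, 0), (1, 1), 'd') for i in range(N)] +
--                 [((0, j), (1, 1), 'd') for j in range(N)])
--     # yapf: enable
--
--     streaks = {'c': [], 'r': [], 'd': []}
--     for (pos, (diri, dirj), dir) in pos_dirs:
--         streak = 0
--         (i, j) = pos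
--         while (i < N) and (j < N):
--             if grid[i][j] == player:
--                 streak += 1
--             else:
--                 if streak >= 4:
--                     streaks[dir].append(pos)
--                 streak = 0
--             i += diri
--             j += dirj
--     return streaks
-- ===== SOURCE B (Python) =====
-- def find_streaks(grid, N, player):
--     # Same line list as the original; per line, materialize the cells and slide a
--     # 5-cell window: a terminated streak of >=4 is exactly a window p,p,p,p,x (x != player).
--     pos_dirs = ([((i, 0), (0, 1), 'c') for i in range(N)] +
--                 [((0, j), (1, 0), 'r') for j in range(N)] +
--                 [((i, 0), (1, 1), 'd') for i in range(N)] +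
--                 [((0, j), (1, 1), 'd') for j in range(N)])
--
--     streaks = {'c': [], 'r': [], 'd': []}
--     for (pos, (diri, dirj), dir) in pos_dirs:
--         cells = []
--         (i, j) = pos
--         while (i < N) and (j < N):
--             cells.append(grid[i][j])
--             i += diri
--             j += dirj
--         for a, b, c, d, e in zip(cells, cells[1:], cells[2:], cells[3:], cells[4:]):
--             if a == b == c == d == player and e != player:
--                 streaks[dir].append(pos)
--     return streaks
-- ===== Notes on version B (the rewrite author's own statement) =====
-- stated objective: idiomatic
-- what changed: Instead of walking each line with a running streak counter and reset logic, B materializes the cells of each line and slides a 5-cell window over them (zip of shifted lists), appending the line start for each window of four player cells followed by a non-player cell, which is exactly a terminated streak of length >= 4.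
import Mathlib
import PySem

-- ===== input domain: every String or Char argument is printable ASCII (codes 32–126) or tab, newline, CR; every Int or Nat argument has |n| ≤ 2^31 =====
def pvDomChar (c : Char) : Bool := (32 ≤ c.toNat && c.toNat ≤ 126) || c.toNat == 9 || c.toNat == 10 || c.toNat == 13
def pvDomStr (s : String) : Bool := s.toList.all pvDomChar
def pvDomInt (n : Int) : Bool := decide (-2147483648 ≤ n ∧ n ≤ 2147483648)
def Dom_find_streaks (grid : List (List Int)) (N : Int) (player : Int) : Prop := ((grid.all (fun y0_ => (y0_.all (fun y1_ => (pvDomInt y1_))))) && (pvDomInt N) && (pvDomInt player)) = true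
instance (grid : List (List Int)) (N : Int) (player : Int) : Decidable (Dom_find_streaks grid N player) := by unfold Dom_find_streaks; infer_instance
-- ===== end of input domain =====

-- B replaces A's running streak counter with a sliding 5-cell window over the
-- materialized line (a terminated streak of >= 4 = window [p,p,p,p,non-p]); same cost, more idiomatic.


-- ===== PORT A =====
-- grid[i][j]; exact under Pre_ (both indexes in range); outside Pre_ Python raises IndexError.
def pvCell (grid : List (List Int)) (i j : Int) : Int :=
  PySem.List.pyGetD (PySem.List.pyGetD grid i []) j 0

-- the pos_dirs list (shared text in both Pythons, so a shared helper)
def pvPosDirs (N : Int) : List ((Int × Int) × (Int × Int) × String) :=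
  ((PySem.List.pyRange 0 N 1).map (fun i => ((i, (0 : Int)), ((0 : Int), (1 : Int)), "c"))) ++
  ((PySem.List.pyRange 0 N 1).map (fun j => (((0 : Int), j), ((1 : Int), (0 : Int)), "r"))) ++
  ((PySem.List.pyRange 0 N 1).map (fun i => ((i, (0 : Int)), ((1 : Int), (1 : Int)), "d"))) ++
  ((PySem.List.pyRange 0 N 1).map (fun j => (((0 : Int), j), ((1 : Int), (1 : Int)), "d")))

-- A's inner while loop; fuel only makes the recursion total (2*N+1 steps always suffice:
-- diri+dirj ≥ 1 on every line, so the loop runs at most 2*N iterations).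
def pvLoopA (grid : List (List Int)) (N player : Int) (pos : Int × Int) (diri dirj : Int)
    (dir : String) :
    Nat → Int → Int → Int → PySem.Dict String (List (Int × Int)) → PySem.Dict String (List (Int × Int))
  | 0, _, _, _, st => st
  | fuel + 1, i, j, streak, st =>
    if i < N ∧ j < N then
      if pvCell grid i j = player then
        pvLoopA grid N player pos diri dirj dir fuel (i + diri) (j + dirj) (streak + 1) st
      else
        pvLoopA grid N player pos diri dirj dir fuel (i + diri) (j + dirj) 0
          (if 4 ≤ streak then st.modify dir [] (· ++ [pos]) else st)
    else st

def find_streaks (grid : List (List Int)) (N : Int) (player : Int) :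
    List (String × List (Int × Int)) :=
  let streaks : PySem.Dict String (List (Int × Int)) :=
    ((PySem.Dict.empty.insert "c" []).insert "r" []).insert "d" []
  ((pvPosDirs N).foldl
    (fun st pd =>
      pvLoopA grid N player pd.1 pd.2.1.1 pd.2.1.2 pd.2.2 ((2 * N).toNat + 1) pd.1.1 pd.1.2 0 st)
    streaks).items

-- ===== PORT B =====
-- the cells-materializing while loop of B (same fuel remark as for A's loop)
def pvLineCells (grid : List (List Int)) (N diri dirj : Int) : Nat → Int → Int → List Int
  | 0, _, _ => []
  | fuel + 1, i, j =>
    if i < N ∧ j < N then pvCell grid i j :: pvLineCells grid N diri dirj fuel (i + diri) (j + dirj)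
    else []

-- B's 'for a,b,c,d,e in zip(cells, cells[1:], cells[2:], cells[3:], cells[4:])' loop:
-- the zip of the shifted lists is exactly the list of sliding 5-windows, consumed front to back.
def pvScanB (player : Int) (pos : Int × Int) (dir : String) :
    List Int → PySem.Dict String (List (Int × Int)) → PySem.Dict String (List (Int × Int))
  | a :: b :: c :: d :: e :: rest, st =>
      pvScanB player pos dir (b :: c :: d :: e :: rest)
        (if a = player ∧ b = player ∧ c = player ∧ d = player ∧ e ≠ player then
          st.modify dir [] (· ++ [pos]) else st)
  | _, st => st

def find_streaks_alt (grid : List (List Int)) (N : Int) (player : Int) :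
    List (String × List (Int × Int)) :=
  let streaks : PySem.Dict String (List (Int × Int)) :=
    ((PySem.Dict.empty.insert "c" []).insert "r" []).insert "d" []
  ((pvPosDirs N).foldl
    (fun st pd =>
      pvScanB player pd.1 pd.2.2
        (pvLineCells grid N pd.2.1.1 pd.2.1.2 ((2 * N).toNat + 1) pd.1.1 pd.1.2) st)
    streaks).items

-- ===== PRECONDITION & SPEC =====
-- Python A reads grid[i][j] for every 0 ≤ i, j < N, so it raises IndexError unless the
-- grid has at least N rows whose first N of them each have at least N entries.
def Pre_find_streaks (grid : List (List Int)) (N : Int) (player : Int) : Prop :=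
  N ≤ (grid.length : Int) ∧ ∀ r ∈ grid.take N.toNat, N ≤ (r.length : Int)
instance (grid : List (List Int)) (N : Int) (player : Int) : Decidable (Pre_find_streaks grid N player) := by unfold Pre_find_streaks; infer_instance

def pvWitness_find_streaks : List (List Int) × Int × Int := ([[1, 1], [0, 1]], 2, 1)

def Spec_find_streaks (grid : List (List Int)) (N : Int) (player : Int) (out : List (String × List (Int × Int))) : Prop := out = find_streaks_alt grid N player
instance (grid : List (List Int)) (N : Int) (player : Int) (out : List (String × List (Int × Int))) : Decidable (Spec_find_streaks grid N player out) := by unfold Spec_find_streaks; infer_instance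

-- ===== CLAIM (what is proved, stated in full; the proofs are below) =====
def Claim_equal_find_streaks : Prop := ∀ (grid : List (List Int)) (N : Int) (player : Int), Dom_find_streaks grid N player → Pre_find_streaks grid N player → Spec_find_streaks grid N player (find_streaks grid N player)

-- ===== LEMMAS AND PROOFS =====

-- per-line abstractions: A's loop appends the line start once per run of ≥ 4 player
-- cells that is TERMINATED by a later non-player cell on the line
def pvRunA (player : Int) : List Int → Int → Nat
  | [], _ => 0
  | c :: cs, s =>
    if c = player then pvRunA player cs (s + 1)
    else (if 4 ≤ s then 1 else 0) + pvRunA player cs 0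

-- B's window count
def pvWC (player : Int) : List Int → Nat
  | a :: b :: c :: d :: e :: rest =>
      (if a = player ∧ b = player ∧ c = player ∧ d = player ∧ e ≠ player then 1 else 0) +
      pvWC player (b :: c :: d :: e :: rest)
  | _ => 0

-- capped-state version of pvRunA, the bridge between the two
def pvWCs (player : Int) : List Int → Nat → Nat
  | [], _ => 0
  | c :: cs, s =>
    if c = player then pvWCs player cs (min (s + 1) 4)
    else (if s = 4 then 1 else 0) + pvWCs player cs 0

theorem pvWC_cons_of_ne (p x : Int) (l : List Int) (hx : x ≠ p) :
    pvWC p (x :: l) = pvWC p l := by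
  rcases l with _ | ⟨b, _ | ⟨c, _ | ⟨d, _ | ⟨e, r⟩⟩⟩⟩ <;> simp [pvWC, hx]

theorem pvWC_p1 (p x : Int) (l : List Int) (hx : x ≠ p) :
    pvWC p (p :: x :: l) = pvWC p (x :: l) := by
  rcases l with _ | ⟨c, _ | ⟨d, _ | ⟨e, r⟩⟩⟩ <;> simp [pvWC, hx]

theorem pvWC_p2 (p x : Int) (l : List Int) (hx : x ≠ p) :
    pvWC p (p :: p :: x :: l) = pvWC p (p :: x :: l) := by
  rcases l with _ | ⟨d, _ | ⟨e, r⟩⟩ <;> simp [pvWC, hx]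

theorem pvWC_p3 (p x : Int) (l : List Int) (hx : x ≠ p) :
    pvWC p (p :: p :: p :: x :: l) = pvWC p (p :: p :: x :: l) := by
  rcases l with _ | ⟨e, r⟩ <;> simp [pvWC, hx]

theorem pvWC_p4 (p x : Int) (l : List Int) (hx : x ≠ p) :
    pvWC p (p :: p :: p :: p :: x :: l) = 1 + pvWC p (p :: p :: p :: x :: l) := by
  simp [pvWC, hx]

theorem pvWC_p5 (p : Int) (l : List Int) :
    pvWC p (p :: p :: p :: p :: p :: l) = pvWC p (p :: p :: p :: p :: l) := by
  simp [pvWC]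

-- pvWCs with (capped) carry s equals pvWC with s player cells prepended
theorem pvWCs_eq_pvWC (p : Int) (cs : List Int) :
    ∀ s : Nat, s ≤ 4 → pvWCs p cs s = pvWC p (List.replicate s p ++ cs) := by
  induction cs with
  | nil =>
    intro s hs
    interval_cases s <;> simp [pvWCs, pvWC, List.replicate]
  | cons c cs ih =>
    intro s hs
    by_cases hc : c = p
    · rw [hc]
      have hrepl : List.replicate s p ++ p :: cs = List.replicate (s + 1) p ++ cs := by
        rw [List.replicate_succ' (n := s)]; simp
      have step : pvWCs p (p :: cs) s = pvWCs p cs (min (s + 1) 4) := by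
        simp [pvWCs]
      rw [step, hrepl]
      rcases Nat.lt_or_ge s 4 with h4 | h4
      · rw [show min (s + 1) 4 = s + 1 by omega]
        exact ih (s + 1) (by omega)
      · have hs4 : s = 4 := by omega
        subst hs4
        rw [show min (4 + 1) 4 = 4 by omega, ih 4 (by omega)]
        simp only [List.replicate, List.cons_append, List.nil_append]
        rw [pvWC_p5]
    · have step : pvWCs p (c :: cs) s = (if s = 4 then 1 else 0) + pvWCs p cs 0 := by
        simp [pvWCs, hc]
      rw [step, ih 0 (by omega)]
      interval_cases s
      · simp only [List.replicate, List.nil_append]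
        rw [pvWC_cons_of_ne p c cs hc]; simp
      · simp only [List.replicate, List.cons_append, List.nil_append]
        rw [pvWC_p1 p c cs hc, pvWC_cons_of_ne p c cs hc]; simp
      · simp only [List.replicate, List.cons_append, List.nil_append]
        rw [pvWC_p2 p c cs hc, pvWC_p1 p c cs hc, pvWC_cons_of_ne p c cs hc]; simp
      · simp only [List.replicate, List.cons_append, List.nil_append]
        rw [pvWC_p3 p c cs hc, pvWC_p2 p c cs hc, pvWC_p1 p c cs hc,
          pvWC_cons_of_ne p c cs hc]; simp
      · simp only [List.replicate, List.cons_append, List.nil_append]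
        rw [pvWC_p4 p c cs hc, pvWC_p3 p c cs hc, pvWC_p2 p c cs hc, pvWC_p1 p c cs hc,
          pvWC_cons_of_ne p c cs hc]; simp

-- A's per-line count equals the capped-state count
theorem pvRunA_eq_pvWCs (p : Int) (cs : List Int) :
    ∀ s : Int, 0 ≤ s → pvRunA p cs s = pvWCs p cs (min s.toNat 4) := by
  induction cs with
  | nil => intro s _; simp [pvRunA, pvWCs]
  | cons c cs ih =>
    intro s hs
    by_cases hc : c = p
    · simp only [pvRunA, pvWCs, if_pos hc]
      rw [ih (s + 1) (by omega)]
      congr 1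
      omega
    · simp only [pvRunA, pvWCs, if_neg hc]
      rw [ih 0 (by omega)]
      congr 1
      by_cases h4 : 4 ≤ s
      · rw [if_pos h4, if_pos (by omega)]
      · rw [if_neg h4, if_neg (by omega)]

-- characterization of A's loop: it appends the line start (pvRunA …) times
theorem pvLoopA_eq (grid : List (List Int)) (N player : Int) (pos : Int × Int)
    (diri dirj : Int) (dir : String) (fuel : Nat) :
    ∀ (i j streak : Int) (st : PySem.Dict String (List (Int × Int))),
      pvLoopA grid N player pos diri dirj dir fuel i j streak st =
        (List.replicate (pvRunA player (pvLineCells grid N diri dirj fuel i j) streak) pos).foldl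
          (fun st q => st.modify dir [] (· ++ [q])) st := by
  induction fuel with
  | zero => intro i j streak st; simp [pvLoopA, pvLineCells, pvRunA]
  | succ fuel ih =>
    intro i j streak st
    by_cases hb : i < N ∧ j < N
    · by_cases hc : pvCell grid i j = player
      · simp only [pvLoopA, pvLineCells, if_pos hb, if_pos hc, pvRunA]
        exact ih (i + diri) (j + dirj) (streak + 1) st
      · simp only [pvLoopA, pvLineCells, if_pos hb, if_neg hc, pvRunA]
        by_cases h4 : 4 ≤ streak
        · simp only [if_pos h4]
          rw [ih (i + diri) (j + dirj) 0, Nat.add_comm 1, List.replicate_succ,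
            List.foldl_cons]
        · simp only [if_neg h4]
          rw [ih (i + diri) (j + dirj) 0, Nat.zero_add]
    · simp [pvLoopA, pvLineCells, if_neg hb, pvRunA]

-- characterization of B's window scan: it appends the line start (pvWC …) times
theorem pvScanB_eq (player : Int) (pos : Int × Int) (dir : String) :
    ∀ (cells : List Int) (st : PySem.Dict String (List (Int × Int))),
      pvScanB player pos dir cells st =
        (List.replicate (pvWC player cells) pos).foldl
          (fun st q => st.modify dir [] (· ++ [q])) st := by
  intro cells
  induction cells with
  | nil => intro st; simp [pvScanB, pvWC]
  | cons a tail ih =>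
    intro st
    rcases tail with _ | ⟨b, _ | ⟨c, _ | ⟨d, _ | ⟨e, rest⟩⟩⟩⟩
    · simp [pvScanB, pvWC]
    · simp [pvScanB, pvWC]
    · simp [pvScanB, pvWC]
    · simp [pvScanB, pvWC]
    · by_cases h : a = player ∧ b = player ∧ c = player ∧ d = player ∧ e ≠ player
      · simp only [pvScanB, if_pos h]
        rw [ih]
        have hwc : pvWC player (a :: b :: c :: d :: e :: rest) =
            1 + pvWC player (b :: c :: d :: e :: rest) := by
          simp only [pvWC, if_pos h]
        rw [hwc, Nat.add_comm 1, List.replicate_succ, List.foldl_cons]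
      · simp only [pvScanB, if_neg h]
        rw [ih]
        have hwc : pvWC player (a :: b :: c :: d :: e :: rest) =
            pvWC player (b :: c :: d :: e :: rest) := by
          simp only [pvWC, if_neg h, Nat.zero_add]
        rw [hwc]

-- the two per-line steps agree on every state
theorem pvStep_eq (grid : List (List Int)) (N player : Int)
    (pd : (Int × Int) × (Int × Int) × String) (st : PySem.Dict String (List (Int × Int))) :
    pvLoopA grid N player pd.1 pd.2.1.1 pd.2.1.2 pd.2.2 ((2 * N).toNat + 1) pd.1.1 pd.1.2 0 st =
    pvScanB player pd.1 pd.2.2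
      (pvLineCells grid N pd.2.1.1 pd.2.1.2 ((2 * N).toNat + 1) pd.1.1 pd.1.2) st := by
  rw [pvLoopA_eq, pvScanB_eq]
  have h0 : pvRunA player (pvLineCells grid N pd.2.1.1 pd.2.1.2 ((2 * N).toNat + 1) pd.1.1 pd.1.2) 0 =
      pvWC player (pvLineCells grid N pd.2.1.1 pd.2.1.2 ((2 * N).toNat + 1) pd.1.1 pd.1.2) := by
    rw [pvRunA_eq_pvWCs _ _ 0 (by omega)]
    have := pvWCs_eq_pvWC player
      (pvLineCells grid N pd.2.1.1 pd.2.1.2 ((2 * N).toNat + 1) pd.1.1 pd.1.2) 0 (by omega)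
    simpa using this
  rw [h0]

theorem pv_ports_eq (grid : List (List Int)) (N player : Int) :
    find_streaks grid N player = find_streaks_alt grid N player := by
  unfold find_streaks find_streaks_alt
  refine congrArg PySem.Dict.items ?_
  apply PySem.List.foldl_congr_mem
  intro st pd _
  exact pvStep_eq grid N player pd st

-- ===== VERDICT (by name: the statement is the Claim_ definition above) =====
theorem find_streaks_spec : Claim_equal_find_streaks := by
  intro grid N player _ _
  unfold Spec_find_streaks
  exact pv_ports_eq grid N player
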